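-- pv_equiv track=rewrite | github.com/bhaashik/ReducedToCanonicalConvDiff | register_comparison/comparators/v5_feature_detector.py | _extract_punctuation_with_positions
-- ===== SOURCE A (Python) =====
-- from typing import List, Dict, Any
--
-- def _extract_punctuation_with_positions(text: str) -> Dict[str, List[int]]:
--     """Extract all punctuation marks with their positions."""
--     punct_map = {
--         ',': 'comma',
--         ':': 'colon',
--         ';': 'semicolon',
--         '—': 'dash',
--         '-': 'hyphen',
--         '.': 'period',
--         '!': 'exclamation mark',
--         '?': 'question mark',
--         '"': 'quote',
--         '(': 'parenthesis',
--         ')': 'parenthesis',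
--         '/': 'slash',
--         '\u2019': 'apostrophe',  # Right single quotation mark
--         "'": 'apostrophe'
--     }
--
--     result = {}
--     for i, char in enumerate(text):
--         if char in punct_map:
--             punct_type = punct_map[char]
--             if punct_type not in result:
--                 result[punct_type] = []
--             result[punct_type].append(i)
--
--     return result
-- ===== SOURCE B (Python) =====
-- def _extract_punctuation_with_positions(text: str) -> dict:
--     """Extract all punctuation marks with their positions."""
--     punct_map = {
--         ',': 'comma',
--         ':': 'colon',
--         ';': 'semicolon',
--         '—': 'dash',
--         '-': 'hyphen',
--         '.': 'period',
--         '!': 'exclamation mark',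
--         '?': 'question mark',
--         '"': 'quote',
--         '(': 'parenthesis',
--         ')': 'parenthesis',
--         '/': 'slash',
--         '\u2019': 'apostrophe',
--         "'": 'apostrophe',
--     }
--     # One flat pass collecting (type, position) hits, then group them:
--     # key order = first occurrence (dict.fromkeys), each group keeps text order.
--     hits = [(punct_map[c], i) for i, c in enumerate(text) if c in punct_map]
--     order = dict.fromkeys(t for t, _ in hits)
--     return {t: [i for u, i in hits if u == t] for t in order}
-- ===== Notes on version B (the rewrite author's own statement) =====
-- stated objective: alternative
-- what changed: A builds the dict incrementally while scanning (membership test, lazy empty-list insert, append per character); B first collects a flat list of (type, position) hits in one comprehension, derives the key order with dict.fromkeys, and then groups the hit list per type in a dict comprehension.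
import Mathlib
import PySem

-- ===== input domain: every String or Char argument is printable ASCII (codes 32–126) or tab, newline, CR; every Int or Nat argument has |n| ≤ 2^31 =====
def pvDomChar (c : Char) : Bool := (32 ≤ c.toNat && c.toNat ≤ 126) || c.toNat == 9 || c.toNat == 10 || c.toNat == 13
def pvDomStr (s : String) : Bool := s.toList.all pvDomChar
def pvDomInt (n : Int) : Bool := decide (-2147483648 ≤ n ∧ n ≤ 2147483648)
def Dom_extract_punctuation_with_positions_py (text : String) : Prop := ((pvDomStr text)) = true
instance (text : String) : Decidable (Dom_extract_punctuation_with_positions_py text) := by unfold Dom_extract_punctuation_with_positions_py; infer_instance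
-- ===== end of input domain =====

-- B replaces A's incremental dict building by a flat hit list that is then grouped
-- (first-occurrence key order, positions in text order): a different decomposition, not faster.

-- ===== PORT A =====
-- the literal punct_map of the Python source (shared constant of both versions)
def pvPunctMap : PySem.Dict Char String := PySem.Dict.mk
  [ (',', "comma"), (':', "colon"), (';', "semicolon"), ('—', "dash"), ('-', "hyphen"),
    ('.', "period"), ('!', "exclamation mark"), ('?', "question mark"), ('"', "quote"),
    ('(', "parenthesis"), (')', "parenthesis"), ('/', "slash"),
    ('\u2019', "apostrophe"), ('\'', "apostrophe") ]

-- A: one pass over enumerate(text); "if t not in result: result[t] = []; result[t].append(i)"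
-- is exactly Dict.modify t [] (· ++ [i]) (the PySem idiom for this Python pattern).
def extract_punctuation_with_positions_py (text : String) : List (String × List Int) :=
  ((PySem.List.enumerate text.toList 0).foldl
    (fun result p =>
      match pvPunctMap.get? p.2 with
      | some t => result.modify t [] (· ++ [p.1])
      | none => result)
    PySem.Dict.empty).items

-- ===== PORT B =====
-- hits = [(punct_map[c], i) for i, c in enumerate(text) if c in punct_map]
def pvHits (text : String) : List (String × Int) :=
  (PySem.List.enumerate text.toList 0).filterMap
    (fun p => (pvPunctMap.get? p.2).map (fun t => (t, p.1)))

def extract_punctuation_with_positions_py_alt (text : String) : List (String × List Int) :=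
  (PySem.List.dedup ((pvHits text).map (·.1))).map
    (fun t => (t, ((pvHits text).filter (fun h => h.1 == t)).map (·.2)))

-- ===== PRECONDITION & SPEC =====
def Spec_extract_punctuation_with_positions_py (text : String) (out : List (String × List Int)) : Prop := out = extract_punctuation_with_positions_py_alt text
instance (text : String) (out : List (String × List Int)) : Decidable (Spec_extract_punctuation_with_positions_py text out) := by unfold Spec_extract_punctuation_with_positions_py; infer_instance

-- ===== CLAIM (what is proved, stated in full; the proofs are below) =====
def Claim_equal_extract_punctuation_with_positions_py : Prop := ∀ (text : String), Dom_extract_punctuation_with_positions_py text → Spec_extract_punctuation_with_positions_py text (extract_punctuation_with_positions_py text)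

-- ===== LEMMAS AND PROOFS =====

-- A's fold, skipping non-punctuation characters, is the modify-fold over the hit list.
theorem pv_fold_eq_fold_hits (l : List (Int × Char)) (d : PySem.Dict String (List Int)) :
    l.foldl
      (fun result p =>
        match pvPunctMap.get? p.2 with
        | some t => result.modify t [] (· ++ [p.1])
        | none => result) d
    = (l.filterMap (fun p => (pvPunctMap.get? p.2).map (fun t => (t, p.1)))).foldl
        (fun d h => d.modify h.1 [] (· ++ [h.2])) d := by
  induction l generalizing d with
  | nil => rfl
  | cons p l ih =>
    cases h : pvPunctMap.get? p.2 <;> simp [List.foldl, h, ih]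


-- ===== VERDICT (by name: the statement is the Claim_ definition above) =====
theorem extract_punctuation_with_positions_py_spec : Claim_equal_extract_punctuation_with_positions_py := by
  intro text _
  unfold Spec_extract_punctuation_with_positions_py
  unfold extract_punctuation_with_positions_py extract_punctuation_with_positions_py_alt
  rw [pv_fold_eq_fold_hits]
  rw [show (PySem.List.enumerate text.toList 0).filterMap
      (fun p => (pvPunctMap.get? p.2).map (fun t => (t, p.1))) = pvHits text from rfl]
  have hnd : ((pvHits text).foldl (fun d h => d.modify h.1 [] (· ++ [h.2])) PySem.Dict.empty).keys.Nodup :=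
    PySem.Dict.nodup_keys_foldl_modify_key (pvHits text) (·.1) [] _ PySem.Dict.empty
      PySem.Dict.nodup_keys_empty
  rw [PySem.Dict.items_eq_map_keys _ hnd ([] : List Int)]
  rw [PySem.Dict.keys_foldl_modify_key (pvHits text) (·.1) [] _ PySem.Dict.empty]
  rw [show PySem.Set.update (PySem.Dict.empty (κ := String) (ν := List Int)).keys ((pvHits text).map (·.1))
      = PySem.List.dedup ((pvHits text).map (·.1)) by
    simp [PySem.Dict.keys_empty, PySem.List.dedup_eq_ofList, PySem.Set.ofList, PySem.Set.update]]
  refine List.map_congr_left (fun t _ => ?_)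
  have h := PySem.Dict.getD_foldl_modify_append (pvHits text) PySem.Dict.empty t
  simp [PySem.Dict.getD_empty] at h
  simp [h]
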